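-- pv_equiv track=rewrite | github.com/abbgrade/blob_types | blob_types/blob_types.py | camelCaseToUnderscore
-- ===== SOURCE A (Python) =====
-- def camelCaseToUnderscore(name):
--     """Convert a CamelCaseString into an underscore_string."""
--
--     new_name = []
--     for char in name:
--         if char.isupper() and len(new_name) > 0:
--             new_name.append('_' + char.lower())
--         else:
--             new_name.append(char.lower())
--     return ''.join(new_name)
-- ===== SOURCE B (Python) =====
-- def camelCaseToUnderscore(name):
--     """Convert a CamelCaseString into an underscore_string."""
--     segments = []
--     current = ''
--     for i, char in enumerate(name):
--         if char.isupper() and i > 0: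
--             segments.append(current)
--             current = char
--         else:
--             current += char
--     if name:
--         segments.append(current)
--     return '_'.join(seg.lower() for seg in segments)
-- ===== Notes on version B (the rewrite author's own statement) =====
-- stated objective: simpler
-- what changed: B splits the name into word segments at non-initial uppercase letters and then joins the lowered segments with an underscore separator, instead of A's per-character list append with an inline underscore rule.
import Mathlib
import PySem

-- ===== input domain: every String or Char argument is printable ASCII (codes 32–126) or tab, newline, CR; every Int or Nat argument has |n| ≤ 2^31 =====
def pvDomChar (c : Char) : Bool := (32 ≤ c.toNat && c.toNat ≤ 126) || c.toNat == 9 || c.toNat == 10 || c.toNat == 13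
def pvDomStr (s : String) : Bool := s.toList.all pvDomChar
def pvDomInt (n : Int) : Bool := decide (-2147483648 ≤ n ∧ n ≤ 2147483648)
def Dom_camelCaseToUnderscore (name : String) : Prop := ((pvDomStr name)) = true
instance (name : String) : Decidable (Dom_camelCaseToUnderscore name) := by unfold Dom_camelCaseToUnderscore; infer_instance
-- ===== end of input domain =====

-- B groups the name into word segments and joins their lowercased forms with underscores; A appends char by char with an inline underscore rule. Same return value, proved below.

-- ===== PORT A =====
-- for char in name: append '_'+char.lower() if char.isupper() and len(new_name)>0 else char.lower(); ''.join
def camelCaseToUnderscore (name : String) : String :=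
  let newName : List (List Char) :=
    name.toList.foldl (fun acc c =>
      if PySem.Chars.isupper c ∧ 0 < acc.length then
        acc ++ [['_'] ++ [PySem.Chars.lowerChar c]]
      else
        acc ++ [[PySem.Chars.lowerChar c]]) []
  String.mk (PySem.Chars.join [] newName)

-- ===== PORT B =====
-- (segments, current, index) state; at a non-initial uppercase push current and restart; finally '_'.join of lowered segments
def camelCaseToUnderscore_alt (name : String) : String :=
  let st : List (List Char) × List Char × Nat :=
    name.toList.foldl (fun p c =>
      if PySem.Chars.isupper c ∧ 0 < p.2.2 then
        (p.1 ++ [p.2.1], [c], p.2.2 + 1)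
      else
        (p.1, p.2.1 ++ [c], p.2.2 + 1)) ([], [], 0)
  let segments : List (List Char) :=
    if name.toList.isEmpty then st.1 else st.1 ++ [st.2.1]
  String.mk (PySem.Chars.join ['_'] (segments.map PySem.Chars.lower))

-- ===== PRECONDITION & SPEC =====
def Spec_camelCaseToUnderscore (name : String) (out : String) : Prop := out = camelCaseToUnderscore_alt name
instance (name : String) (out : String) : Decidable (Spec_camelCaseToUnderscore name out) := by unfold Spec_camelCaseToUnderscore; infer_instance

-- ===== CLAIM (what is proved, stated in full; the proofs are below) =====
def Claim_equal_camelCaseToUnderscore : Prop := ∀ (name : String), Dom_camelCaseToUnderscore name → Spec_camelCaseToUnderscore name (camelCaseToUnderscore name)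

-- ===== LEMMAS AND PROOFS =====

theorem pv_join_nil_eq_flatten (l : List (List Char)) :
    PySem.Chars.join [] l = l.flatten := by
  induction l with
  | nil => simp [PySem.Chars.join_nil]
  | cons a l ih =>
    cases l with
    | nil => simp [PySem.Chars.join_singleton]
    | cons b l => rw [PySem.Chars.join_cons_cons, ih]; simp

theorem pv_join_append_singleton (sep : List Char) (xs : List (List Char)) (y : List Char)
    (h : xs ≠ []) :
    PySem.Chars.join sep (xs ++ [y]) = PySem.Chars.join sep xs ++ sep ++ y := by
  induction xs with
  | nil => exact absurd rfl h
  | cons a xs ih =>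
    cases xs with
    | nil => simp [PySem.Chars.join_cons_cons, PySem.Chars.join_singleton]
    | cons b xs =>
      rw [show (a :: b :: xs) ++ [y] = a :: b :: (xs ++ [y]) from rfl,
        PySem.Chars.join_cons_cons,
        show (b : List Char) :: (xs ++ [y]) = (b :: xs) ++ [y] from rfl,
        ih (by simp), PySem.Chars.join_cons_cons]
      simp

theorem pv_join_snoc_append (sep : List Char) (xs : List (List Char)) (y z : List Char) :
    PySem.Chars.join sep (xs ++ [y ++ z]) = PySem.Chars.join sep (xs ++ [y]) ++ z := by
  induction xs with
  | nil => simp [PySem.Chars.join_singleton]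
  | cons a xs ih =>
    cases xs with
    | nil => simp [PySem.Chars.join_cons_cons, PySem.Chars.join_singleton]
    | cons b xs =>
      rw [show (a :: b :: xs) ++ [y ++ z] = a :: b :: (xs ++ [y ++ z]) from rfl,
        PySem.Chars.join_cons_cons,
        show (b : List Char) :: (xs ++ [y ++ z]) = (b :: xs) ++ [y ++ z] from rfl,
        ih,
        show (a :: b :: xs) ++ [y] = a :: b :: (xs ++ [y]) from rfl,
        PySem.Chars.join_cons_cons,
        show (b : List Char) :: (xs ++ [y]) = (b :: xs) ++ [y] from rfl]
      simp

-- loop invariant: A's joined pieces equal B's '_'-joined lowered (segments ++ [current]), with acc.length = index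
theorem pv_key (cs : List Char) (accA : List (List Char)) (segs : List (List Char))
    (cur : List Char) (i : Nat) (hlen : accA.length = i)
    (hinv : PySem.Chars.join [] accA
      = PySem.Chars.join ['_'] ((segs ++ [cur]).map PySem.Chars.lower)) :
    PySem.Chars.join []
      (cs.foldl (fun acc c =>
        if PySem.Chars.isupper c ∧ 0 < acc.length then
          acc ++ [['_'] ++ [PySem.Chars.lowerChar c]]
        else
          acc ++ [[PySem.Chars.lowerChar c]]) accA)
    = PySem.Chars.join ['_']
      ((((cs.foldl (fun p c =>
          if PySem.Chars.isupper c ∧ 0 < p.2.2 then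
            (p.1 ++ [p.2.1], [c], p.2.2 + 1)
          else
            (p.1, p.2.1 ++ [c], p.2.2 + 1)) (segs, cur, i)).1
        ++ [(cs.foldl (fun p c =>
          if PySem.Chars.isupper c ∧ 0 < p.2.2 then
            (p.1 ++ [p.2.1], [c], p.2.2 + 1)
          else
            (p.1, p.2.1 ++ [c], p.2.2 + 1)) (segs, cur, i)).2.1]).map PySem.Chars.lower)) := by
  induction cs generalizing accA segs cur i with
  | nil => simpa using hinv
  | cons c cs ih =>
    simp only [List.foldl_cons]
    by_cases hc : PySem.Chars.isupper c = true ∧ 0 < i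
    · rw [if_pos ⟨hc.1, by omega⟩, if_pos hc]
      refine ih _ _ _ _ (by simp [hlen]) ?_
      rw [pv_join_nil_eq_flatten, List.flatten_append, ← pv_join_nil_eq_flatten accA, hinv,
        List.map_append (f := PySem.Chars.lower) (l₁ := segs ++ [cur]) (l₂ := [[c]]),
        show List.map PySem.Chars.lower [[c]] = [PySem.Chars.lower [c]] from rfl,
        pv_join_append_singleton ['_'] ((segs ++ [cur]).map PySem.Chars.lower) _ (by simp)]
      simp [PySem.Chars.lower]
    · have hc' : ¬ (PySem.Chars.isupper c = true ∧ 0 < accA.length) := by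
        rw [hlen]; exact hc
      rw [if_neg hc', if_neg hc]
      refine ih _ _ _ _ (by simp [hlen]) ?_
      rw [pv_join_nil_eq_flatten, List.flatten_append, ← pv_join_nil_eq_flatten accA, hinv,
        List.map_append (f := PySem.Chars.lower) (l₁ := segs) (l₂ := [cur ++ [c]]),
        show List.map PySem.Chars.lower [cur ++ [c]]
          = [PySem.Chars.lower cur ++ [PySem.Chars.lowerChar c]] from by simp [PySem.Chars.lower],
        pv_join_snoc_append]
      simp [PySem.Chars.lower]

-- ===== VERDICT (by name: the statement is the Claim_ definition above) =====
theorem camelCaseToUnderscore_spec : Claim_equal_camelCaseToUnderscore := by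
  intro name _
  show camelCaseToUnderscore name = camelCaseToUnderscore_alt name
  unfold camelCaseToUnderscore camelCaseToUnderscore_alt
  cases h : name.toList with
  | nil => simp [PySem.Chars.join_nil]
  | cons c cs =>
    simp only [List.isEmpty_cons, if_neg Bool.false_ne_true]
    congr 1
    exact pv_key (c :: cs) [] [] [] 0 rfl (by
      simp [PySem.Chars.join_nil, PySem.Chars.join_singleton, PySem.Chars.lower])
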